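-- pv_equiv track=rewrite | github.com/Vishnudharan24/TorpedoX | Test4/Dataset_Gen.py | generate_amsco_cipher
-- ===== SOURCE A (Python) =====
-- def generate_amsco_cipher(plaintext, period=4):
--     rows = [''] * period
--     i = 0
--     for index, char in enumerate(plaintext):
--         rows[i] += char
--         if index % 2 == 0:
--             i = (i + 1) % period
--         else:
--             i = (i + 2) % period
--     return ''.join(rows)
-- ===== SOURCE B (Python) =====
-- def generate_amsco_cipher(plaintext, period=4):
--     # Gather the output row by row: position k belongs to row (3*(k//2) + k%2) % period,
--     # so row r of the AMSCO layout is exactly the subsequence of characters at those positions.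
--     return ''.join(plaintext[k]
--                    for r in range(period)
--                    for k in range(len(plaintext))
--                    if (3 * (k // 2) + k % 2) % period == r)
-- ===== Notes on version B (the rewrite author's own statement) =====
-- stated objective: alternative
-- what changed: Replaces A's single-pass scatter into row buffers driven by a stateful running index with a staged row-by-row gather: for each row r in order, collect the characters whose position belongs to row r, trading A's O(n) scatter for an O(n*period) gather with no mutable row state.
import Mathlib
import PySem

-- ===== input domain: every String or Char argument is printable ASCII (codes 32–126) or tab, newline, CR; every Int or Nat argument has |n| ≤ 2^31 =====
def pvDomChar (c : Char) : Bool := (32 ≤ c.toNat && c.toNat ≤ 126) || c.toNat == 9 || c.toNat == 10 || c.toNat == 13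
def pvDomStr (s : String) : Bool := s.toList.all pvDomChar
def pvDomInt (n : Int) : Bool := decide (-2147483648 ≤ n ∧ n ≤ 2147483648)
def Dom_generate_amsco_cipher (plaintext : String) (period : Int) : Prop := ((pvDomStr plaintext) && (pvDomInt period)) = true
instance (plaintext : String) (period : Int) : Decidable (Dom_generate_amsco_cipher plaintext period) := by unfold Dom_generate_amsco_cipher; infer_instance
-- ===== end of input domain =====

-- B replaces A's single-pass scatter into row buffers (stateful running index) with a
-- row-by-row gather: for each row r, collect the characters whose position lands in row r
-- (objective: alternative decomposition, same result).


-- ===== PORT A =====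
-- rows[i] += char raises IndexError when i is out of range (period ≤ 0 and plaintext ≠ "");
-- Pre_ excludes that, so the total forms pyGetD/pySetD are exact on the admitted inputs.
-- One iteration of A's loop body over the state (rows, i).
def pvStepA (period : Int) (st : List String × Int) (p : Int × Char) : List String × Int :=
  let rows := PySem.List.pySetD st.1 st.2 ((PySem.List.pyGetD st.1 st.2 "").push p.2)
  let i := if PySem.Int.mod p.1 2 == 0 then PySem.Int.mod (st.2 + 1) period
           else PySem.Int.mod (st.2 + 2) period
  (rows, i)

def generate_amsco_cipher (plaintext : String) (period : Int) : String :=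
  let init : List String × Int := (List.replicate period.toNat "", 0)
  let st := (PySem.List.enumerate plaintext.toList 0).foldl (pvStepA period) init
  PySem.Str.join "" st.1

-- ===== PORT B =====
-- Row of position k in the AMSCO layout.
def pvRow (period k : Int) : Int :=
  PySem.Int.mod (3 * PySem.Int.floordiv k 2 + PySem.Int.mod k 2) period

-- ''.join(plaintext[k] for r in range(period) for k in range(len(plaintext)) if row(k) == r);
-- plaintext[k] with k drawn from range(len(plaintext)) is always in range, so pyGetD is exact here.
def generate_amsco_cipher_alt (plaintext : String) (period : Int) : String :=
  String.ofList ((PySem.List.pyRange 0 period 1).flatMap (fun r =>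
    ((PySem.List.pyRange 0 (PySem.Str.len plaintext) 1).filter (fun k => pvRow period k == r)).map
      (fun k => PySem.List.pyGetD plaintext.toList k ' ')))

-- ===== PRECONDITION & SPEC =====
-- A raises IndexError when period ≤ 0 and plaintext is nonempty (rows = [] is indexed);
-- Pre_ excludes exactly those inputs.
def Pre_generate_amsco_cipher (plaintext : String) (period : Int) : Prop :=
  0 < period ∨ plaintext = ""
instance (plaintext : String) (period : Int) : Decidable (Pre_generate_amsco_cipher plaintext period) := by unfold Pre_generate_amsco_cipher; infer_instance
def pvWitness_generate_amsco_cipher : String × Int := ("HELLOWORLD", 4)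

def Spec_generate_amsco_cipher (plaintext : String) (period : Int) (out : String) : Prop := out = generate_amsco_cipher_alt plaintext period
instance (plaintext : String) (period : Int) (out : String) : Decidable (Spec_generate_amsco_cipher plaintext period out) := by unfold Spec_generate_amsco_cipher; infer_instance

-- ===== CLAIM (what is proved, stated in full; the proofs are below) =====
def Claim_equal_generate_amsco_cipher : Prop := ∀ (plaintext : String) (period : Int), Dom_generate_amsco_cipher plaintext period → Pre_generate_amsco_cipher plaintext period → Spec_generate_amsco_cipher plaintext period (generate_amsco_cipher plaintext period)

-- ===== LEMMAS AND PROOFS =====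

-- The rows as character lists, gathered row by row (proof-side common form of both programs).
def pvGather (cs : List Char) (period : Int) : List (List Char) :=
  (List.range period.toNat).map (fun (r : Nat) =>
    ((List.range cs.length).filter (fun (j : Nat) => pvRow period (j : Int) == (r : Int))).map
      (fun (j : Nat) => cs.getD j ' '))

lemma pvGather_length (cs : List Char) (period : Int) :
    (pvGather cs period).length = period.toNat := by
  simp [pvGather]

-- Closed-form row index A's running index reaches after processing n characters.
def pvNextIdx (period : Int) (n : Nat) : Int :=
  (3 * ((n : Int) / 2) + (n : Int) % 2) % period

-- pvRow at a Nat position agrees with the closed form (positive period).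
lemma pvIdx_closed (period : Int) (hp : 0 < period) (n : Nat) :
    pvRow period (n : Int) = pvNextIdx period n := by
  unfold pvRow
  rw [PySem.Int.mod_eq_emod_of_pos hp]; unfold pvNextIdx
  congr 2 <;> simp

lemma pvRow_bounds (period : Int) (hp : 0 < period) (k : Int) :
    0 ≤ pvRow period k ∧ pvRow period k < period := by
  exact ⟨PySem.Int.mod_nonneg _ hp, PySem.Int.mod_lt _ hp⟩

-- A's running index update from the closed form at n yields the closed form at n+1.
lemma pvIdx_step (period : Int) (hp : 0 < period) (n : Nat) :
    (if PySem.Int.mod (n : Int) 2 == 0 then PySem.Int.mod (pvNextIdx period n + 1) period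
     else PySem.Int.mod (pvNextIdx period n + 2) period) = pvNextIdx period (n + 1) := by
  have hm : ∀ a : Int, PySem.Int.mod a period = a % period :=
    fun a => PySem.Int.mod_eq_emod_of_pos hp
  unfold pvNextIdx
  rcases Nat.mod_two_eq_zero_or_one n with h | h
  · simp [hm]
    rw [if_pos (by omega : (2:Int) ∣ (n:Int))]
    congr 1
    omega
  · simp [hm]
    rw [if_neg (by omega : ¬ (2:Int) ∣ (n:Int))]
    congr 1
    omega

-- Appending one character to the gathered rows appends it to the end of its row.
lemma pvGather_append (period : Int) (hp : 0 < period) (l : List Char) (c : Char) :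
    pvGather (l ++ [c]) period
      = (pvGather l period).set (pvRow period (l.length : Int)).toNat
          ((pvGather l period).getD (pvRow period (l.length : Int)).toNat [] ++ [c]) := by
  obtain ⟨hge, hlt'⟩ := pvRow_bounds period hp (l.length : Int)
  have hlt : (pvRow period (l.length : Int)).toNat < period.toNat := by omega
  have hcast : ((pvRow period (l.length : Int)).toNat : Int) = pvRow period (l.length : Int) := by
    omega
  apply List.ext_getElem
  · simp [pvGather]
  intro r h1 h2
  rw [List.getElem_set]
  have hrn : r < period.toNat := by
    simpa [pvGather] using h1
  unfold pvGather
  simp only [List.getElem_map, List.getElem_range, List.length_append, List.length_singleton]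
  rw [List.range_succ, List.filter_append, List.map_append]
  have hhead : (((List.range l.length).filter (fun (j : Nat) => pvRow period (j : Int) == (r : Int))).map
        (fun (j : Nat) => (l ++ [c]).getD j ' '))
      = ((List.range l.length).filter (fun (j : Nat) => pvRow period (j : Int) == (r : Int))).map
        (fun (j : Nat) => l.getD j ' ') := by
    apply List.map_congr_left
    intro j hj
    have hjl : j < l.length := List.mem_range.mp (List.mem_filter.mp hj).1
    rw [List.getD_eq_getElem?_getD, List.getD_eq_getElem?_getD, List.getElem?_append_left hjl]
  rw [hhead]
  have hgetD : (pvGather l period).getD r []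
      = ((List.range l.length).filter (fun (j : Nat) => pvRow period (j : Int) == (r : Int))).map
        (fun (j : Nat) => l.getD j ' ') := by
    rw [List.getD_eq_getElem?_getD]
    unfold pvGather
    rw [List.getElem?_map]
    simp [List.getElem?_range hrn]
  by_cases hr : (pvRow period (l.length : Int)).toNat = r
  · rw [if_pos hr]
    have hP : (pvRow period ((l.length : Nat) : Int) == (r : Int)) = true := by
      rw [← hr, hcast]; simp
    rw [List.filter_singleton, hP, cond_true]
    simp only [List.map_cons, List.map_nil]
    rw [List.getD_eq_getElem?_getD, List.getElem?_concat_length, hr]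
    simp only [Option.getD_some]
    exact congrArg (fun t => t ++ [c]) hgetD.symm
  · rw [if_neg hr]
    have hP : (pvRow period ((l.length : Nat) : Int) == (r : Int)) = false := by
      simp only [beq_eq_false_iff_ne, ne_eq]
      intro hEq
      apply hr
      omega
    rw [List.filter_singleton, hP]
    simp

-- Loop invariant: A's fold carries the gathered rows (as strings) plus the closed-form index.
lemma pvInv (period : Int) (hp : 0 < period) (cs : List Char) :
    (PySem.List.enumerate cs 0).foldl (pvStepA period) (List.replicate period.toNat "", 0)
      = ((pvGather cs period).map String.ofList, pvNextIdx period cs.length) := by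
  induction cs using List.reverseRecOn with
  | nil =>
    simp [PySem.List.enumerate_nil, pvGather, pvNextIdx, List.map_const']
  | append_singleton l c ih =>
    have hen : PySem.List.enumerate (l ++ [c]) 0
        = PySem.List.enumerate l 0 ++ [((l.length : Int), c)] := by
      rw [PySem.List.enumerate_append]; simp
    rw [hen, List.foldl_append, ih]
    simp only [List.foldl_cons, List.foldl_nil]
    unfold pvStepA
    obtain ⟨hge, hlt'⟩ := pvRow_bounds period hp (l.length : Int)
    have hidx : pvNextIdx period l.length = pvRow period (l.length : Int) :=
      (pvIdx_closed period hp l.length).symm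
    have hlt : (pvRow period (l.length : Int)).toNat < period.toNat := by omega
    have hlen : (pvRow period (l.length : Int)).toNat < (pvGather l period).length := by
      rw [pvGather_length]; exact hlt
    rw [Prod.mk.injEq]
    constructor
    · simp only [hidx]
      have hlenInt : pvRow period (l.length : Int)
          < (((pvGather l period).map String.ofList).length : Int) := by
        rw [List.length_map, pvGather_length]; omega
      rw [PySem.List.pySetD_of_nonneg _ _ hge,
          PySem.List.pyGetD_eq_getElem _ _ hge hlenInt]
      rw [List.getElem_map]
      have hpush : (String.ofList (pvGather l period)[(pvRow period (l.length : Int)).toNat]).push c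
          = String.ofList ((pvGather l period)[(pvRow period (l.length : Int)).toNat] ++ [c]) := by
        apply String.toList_inj.mp
        simp
      rw [hpush, ← List.map_set, pvGather_append period hp l c]
      congr 2
      rw [List.getD_eq_getElem?_getD, List.getElem?_eq_getElem hlen]
      rfl
    · simpa using pvIdx_step period hp l.length

-- Python's [] .intercalate (PySem.Chars.join "" …) is flatten.
lemma pvJoinNil (G : List (List Char)) : PySem.Chars.join [] G = G.flatten := by
  simp only [PySem.Chars.join]
  unfold List.intercalate
  induction G with
  | nil => simp
  | cons x xs ih =>
    cases xs with
    | nil => simp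
    | cons y ys => simp_all [List.intersperse]

-- ''.join over the gathered rows.
lemma pvJoin (G : List (List Char)) :
    PySem.Str.join "" (G.map String.ofList) = String.ofList G.flatten := by
  simp only [PySem.Str.join]
  congr 1
  have h0 : "".toList = ([] : List Char) := rfl
  rw [h0, pvJoinNil, List.map_map]
  simp [Function.comp_def]

-- B computes the flattened gathered rows (any period).
lemma pvAltEq (plaintext : String) (period : Int) :
    generate_amsco_cipher_alt plaintext period
      = String.ofList (pvGather plaintext.toList period).flatten := by
  unfold generate_amsco_cipher_alt pvGather
  rw [← List.flatMap_def]
  congr 1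
  have houter : PySem.List.pyRange 0 period 1
      = (List.range period.toNat).map (fun (r : Nat) => (r : Int)) := by
    rw [PySem.List.pyRange_one]; simp
  have hinner : PySem.List.pyRange 0 (PySem.Str.len plaintext) 1
      = (List.range plaintext.toList.length).map (fun (j : Nat) => (j : Int)) := by
    rw [PySem.List.pyRange_one]; simp
  rw [houter, hinner, List.flatMap_map]
  apply List.flatMap_congr
  intro r _
  rw [List.filter_map, List.map_map]
  simp [Function.comp_def, List.getD_eq_getElem?_getD]

-- ===== VERDICT (by name: the statements are the Claim_ definitions above) =====
theorem generate_amsco_cipher_spec : Claim_equal_generate_amsco_cipher := by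
  intro plaintext period _ hpre
  unfold Spec_generate_amsco_cipher generate_amsco_cipher
  by_cases hp : 0 < period
  · simp only [pvInv period hp plaintext.toList]
    rw [pvAltEq]
    exact pvJoin _
  · have hs : plaintext = "" := hpre.resolve_left hp
    subst hs
    have h0 : period.toNat = 0 := by omega
    rw [pvAltEq]
    simp [h0, pvGather, PySem.Str.join, PySem.Chars.join_nil, PySem.List.enumerate_nil]
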